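-- pv_equiv track=rewrite | github.com/soobeenpark/scratchwork | algorithms/bit_flips_counter/bitFlipsCounterBitwise.py | bitFlipsBitwise
-- ===== SOURCE A (Python) =====
-- def bitFlipsBitwise(n):
--     """
--     Naiive implementation of number of bit flips necessary in binary counting
--
--     pre: n must be a positive integer (greater than 0).
--     param (int): n
--     return (list): Array containing the number of bit flips for each number, starting from 0.
--     """
--     ret = [0] * n
--     i = 1
--     while (i <= n):
--         numBitFlips = bin(i ^ (i-1)).count("1")
--         ret[i-1] = numBitFlips
--         i += 1
--     assert(0 not in ret)
--     return ret
-- ===== SOURCE B (Python) =====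
-- def bitFlipsBitwise(n):
--     """Bit flips per step of binary counting: entry i-1 is 1 + (number of
--     trailing zero bits of i), computed by an incremental halving loop
--     instead of formatting bin(i ^ (i-1)) and counting characters."""
--     ret = []
--     for i in range(1, n + 1):
--         c, j = 1, i
--         while j % 2 == 0:
--             c += 1
--             j //= 2
--         ret.append(c)
--     return ret
-- ===== Notes on version B (the rewrite author's own statement) =====
-- stated objective: faster
-- what changed: Replaces per-index bin(i ^ (i-1)).count("1") string formatting with an incremental trailing-zeros halving loop (amortized O(1) per index), appending to the result instead of preallocating and assigning.
import Mathlib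
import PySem

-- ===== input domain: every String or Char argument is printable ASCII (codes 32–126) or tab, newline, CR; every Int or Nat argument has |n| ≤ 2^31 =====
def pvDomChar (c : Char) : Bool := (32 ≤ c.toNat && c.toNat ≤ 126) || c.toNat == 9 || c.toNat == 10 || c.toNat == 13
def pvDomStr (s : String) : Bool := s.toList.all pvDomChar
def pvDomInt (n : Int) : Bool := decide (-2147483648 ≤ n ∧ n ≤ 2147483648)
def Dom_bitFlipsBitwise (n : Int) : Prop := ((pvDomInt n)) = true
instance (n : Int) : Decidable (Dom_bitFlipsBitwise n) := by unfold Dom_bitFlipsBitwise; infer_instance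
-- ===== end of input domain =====

-- B replaces per-index bin(i ^ (i-1)).count("1") string formatting by an incremental
-- trailing-zeros halving loop and appends to the result instead of preallocating.

-- ===== PORT A =====
-- the while loop: ret[i-1] = bin(i ^ (i-1)).count("1"); i += 1   (index i-1 is always in range)
def pvWhileA (n i : Int) (ret : List Int) : List Int :=
  if i ≤ n then
    pvWhileA n (i + 1)
      (ret.set (i - 1).toNat
        ((PySem.Str.count (PySem.Int.pyBin (PySem.Int.bxor i (i - 1))) "1" : Nat) : Int))
  else ret
termination_by (n + 1 - i).toNat
decreasing_by omega

-- `assert(0 not in ret)` never fires: every slot 0..n-1 is overwritten with a positive count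
-- (and for n ≤ 0 the list is empty), so the port returns the list directly.
def bitFlipsBitwise (n : Int) : List Int :=
  pvWhileA n 1 (List.replicate n.toNat 0)

-- ===== PORT B =====
-- the inner while loop: while j % 2 == 0: c += 1; j //= 2   (j ≥ 1 at every call site;
-- the j = 0 branch is only a totality guard)
def pvTzLoop (j : Nat) (c : Int) : Int :=
  if j % 2 = 0 then
    if j = 0 then c else pvTzLoop (j / 2) (c + 1)
  else c
termination_by j
decreasing_by omega

-- for i in range(1, n+1): ... ret.append(c)
def bitFlipsBitwise_alt (n : Int) : List Int :=
  (PySem.List.pyRange 1 (n + 1) 1).foldl (fun ret i => ret ++ [pvTzLoop i.toNat 1]) []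

-- ===== PRECONDITION & SPEC =====
def Spec_bitFlipsBitwise (n : Int) (out : List Int) : Prop := out = bitFlipsBitwise_alt n
instance (n : Int) (out : List Int) : Decidable (Spec_bitFlipsBitwise n out) := by unfold Spec_bitFlipsBitwise; infer_instance

-- ===== CLAIM (what is proved, stated in full; the proofs are below) =====
def Claim_equal_bitFlipsBitwise : Prop := ∀ (n : Int), Dom_bitFlipsBitwise n → Spec_bitFlipsBitwise n (bitFlipsBitwise n)

-- ===== LEMMAS AND PROOFS =====

-- counting the substring "1" is counting the character '1'
theorem pv_count_go_one (fuel : Nat) : ∀ (l : List Char) (acc : Nat), l.length ≤ fuel →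
    PySem.Chars.count.go ['1'] fuel l acc = acc + l.count '1' := by
  induction fuel with
  | zero =>
    intro l acc h
    have : l = [] := by cases l <;> simp_all
    subst this; rw [PySem.Chars.count.go]; simp
  | succ f ih =>
    intro l acc h
    match l with
    | [] => rw [PySem.Chars.count.go]; simp; omega
    | c :: t =>
      rw [PySem.Chars.count.go]
      have hp : (['1'].isPrefixOf (c :: t)) = ('1' == c) := by simp [List.isPrefixOf]
      simp only [hp]
      by_cases hc : '1' = c
      · have hb : ('1' == c) = true := beq_iff_eq.mpr hc
        simp only [hb, if_true, List.length_cons, List.length_nil, List.drop_zero,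
          List.drop_succ_cons]
        rw [ih t (acc + 1) (by simpa using h)]
        simp [← hc]
        omega
      · have hb : ('1' == c) = false := by simp [hc]
        simp only [hb, Bool.false_eq_true, if_false]
        rw [ih t acc (by simpa using h)]
        simp [List.count_cons]
        intro h'; exact absurd h'.symm hc

theorem pv_chars_count_one (l : List Char) : PySem.Chars.count l ['1'] = l.count '1' := by
  rw [PySem.Chars.count]
  simp [pv_count_go_one l.length l 0 le_rfl]

-- '1'-characters of the binary digit string = bit count
theorem pv_toDigitsCore_count (fuel : Nat) : ∀ (m : Nat) (ds : List Char), m < fuel →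
    (Nat.toDigitsCore 2 fuel m ds).count '1' = PySem.Int.bitCount (m : Int) + ds.count '1' := by
  induction fuel with
  | zero => omega
  | succ f ih =>
    intro m ds hm
    rw [Nat.toDigitsCore]
    by_cases h0 : m / 2 = 0
    · simp only [h0, if_true]
      have hm01 : m = 0 ∨ m = 1 := by omega
      rcases hm01 with h | h
      · subst h
        simp [Nat.digitChar]
      · subst h
        have b1 : PySem.Int.bitCount (1 : Int) = 1 := by decide
        simp [Nat.digitChar, b1]
        omega
    · simp only [h0, if_false]
      have hf : m / 2 < f := by omega
      rw [ih (m / 2) _ hf]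
      have hpos : 0 < m := by omega
      rw [PySem.Int.bitCount_natCast hpos]
      have hm2 : m % 2 = 0 ∨ m % 2 = 1 := by omega
      rcases hm2 with h | h
      · simp [h, Nat.digitChar]
      · simp [h, Nat.digitChar]
        omega

theorem pv_count_pyBin (m : Nat) :
    PySem.Str.count (PySem.Int.pyBin (m : Int)) "1" = PySem.Int.bitCount (m : Int) := by
  rw [PySem.Str.count_eq, PySem.Int.toList_pyBin, PySem.Int.toBinChars0b]
  have hnn : ¬((m : Int) < 0) := by omega
  simp only [hnn, if_false]
  show PySem.Chars.count ('0' :: 'b' :: Nat.toDigits 2 (Int.toNat m)) ['1'] = _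
  rw [pv_chars_count_one]
  simp only [List.count_cons, Int.toNat_natCast]
  rw [Nat.toDigits]
  rw [pv_toDigitsCore_count (m + 1) m [] (by omega)]
  simp

-- the two xor identities behind i ^ (i-1)
theorem pv_xor_odd (k : Nat) : (2 * k + 1) ^^^ (2 * k) = 1 := by
  have h1 : 2 * k + 1 = Nat.bit true k := by simp [Nat.bit]
  have h2 : 2 * k = Nat.bit false k := by simp [Nat.bit]
  show Nat.bitwise bne _ _ = 1
  rw [h1, h2, Nat.bitwise_bit]
  show Nat.bit true (Nat.xor k k) = 1
  have hx : Nat.xor k k = 0 := Nat.xor_self k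
  rw [hx]
  simp [Nat.bit]

theorem pv_xor_even (k : Nat) (hk : 1 ≤ k) :
    (2 * k) ^^^ (2 * k - 1) = 2 * (k ^^^ (k - 1)) + 1 := by
  have h2 : 2 * k - 1 = Nat.bit true (k - 1) := by simp [Nat.bit]; omega
  have h1 : 2 * k = Nat.bit false k := by simp [Nat.bit]
  show Nat.bitwise bne _ _ = _
  rw [h2, h1, Nat.bitwise_bit]
  show Nat.bit true (Nat.xor k (k - 1)) = _
  simp [Nat.bit]
  rfl

-- pvTzLoop facts
theorem pv_tz_shift (j : Nat) : ∀ c : Int, pvTzLoop j (c + 1) = pvTzLoop j c + 1 := by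
  induction j using Nat.strong_induction_on with
  | _ j ih =>
    intro c
    conv_lhs => rw [pvTzLoop]
    conv_rhs => rw [pvTzLoop]
    split_ifs with h1 h2
    · rfl
    · exact ih (j / 2) (by omega) (c + 1)
    · rfl

theorem pv_tz_odd (j : Nat) (h : j % 2 = 1) (c : Int) : pvTzLoop j c = c := by
  rw [pvTzLoop]; simp [h]

theorem pv_tz_even (k : Nat) (hk : k ≠ 0) (c : Int) : pvTzLoop (2 * k) c = pvTzLoop k (c + 1) := by
  conv_lhs => rw [pvTzLoop]
  have h : 2 * k % 2 = 0 := by omega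
  have h2 : ¬(2 * k = 0) := by omega
  simp only [h, h2, if_true, if_false, Nat.mul_div_cancel_left k (by norm_num : 0 < 2)]

-- pointwise agreement: popcount(j ^ (j-1)) = 1 + trailing zeros of j
theorem pv_main (j : Nat) : 1 ≤ j →
    ((PySem.Int.bitCount ((j ^^^ (j - 1) : Nat) : Int) : Nat) : Int) = pvTzLoop j 1 := by
  induction j using Nat.strong_induction_on with
  | _ j ih =>
    intro hj
    rcases Nat.even_or_odd j with he | ho
    · obtain ⟨k, hk⟩ := he
      have hk1 : 1 ≤ k := by omega
      have hj2 : j = 2 * k := by omega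
      subst hj2
      rw [pv_xor_even k hk1]
      have hpos : 0 < 2 * (k ^^^ (k - 1)) + 1 := by omega
      rw [PySem.Int.bitCount_natCast hpos]
      have hmod : (2 * (k ^^^ (k - 1)) + 1) % 2 = 1 := by omega
      have hdiv : (2 * (k ^^^ (k - 1)) + 1) / 2 = k ^^^ (k - 1) := by omega
      rw [hmod, hdiv]
      rw [pv_tz_even k (by omega) 1]
      have := ih k (by omega) hk1
      rw [pv_tz_shift k 1, ← this]
      push_cast
      ring
    · obtain ⟨k, hk⟩ := ho
      subst hk
      have h1 : 2 * k + 1 - 1 = 2 * k := by omega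
      rw [h1, pv_xor_odd k, pv_tz_odd (2 * k + 1) (by omega) 1]
      decide

-- characterisation of A's while loop
theorem pv_whileA_eq (fuel : Nat) : ∀ (n i : Int) (ret : List Int), (n + 1 - i).toNat ≤ fuel →
    1 ≤ i → ret.length = n.toNat →
    pvWhileA n i ret = ret.take (i - 1).toNat ++
      (PySem.List.pyRange i (n + 1) 1).map
        (fun t => ((PySem.Str.count (PySem.Int.pyBin (PySem.Int.bxor t (t - 1))) "1" : Nat) : Int)) := by
  induction fuel with
  | zero =>
    intro n i ret hf hi hlen
    have hni : ¬(i ≤ n) := by omega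
    rw [pvWhileA]
    simp only [hni, if_false]
    rw [PySem.List.pyRange_one_eq_nil (by omega)]
    rw [List.take_of_length_le (by omega)]
    simp
  | succ f ih =>
    intro n i ret hf hi hlen
    by_cases hni : i ≤ n
    · rw [pvWhileA]
      simp only [hni, if_true]
      have hidx : (i - 1).toNat < ret.length := by omega
      set v : Int := ((PySem.Str.count (PySem.Int.pyBin (PySem.Int.bxor i (i - 1))) "1" : Nat) : Int) with hv
      have hlen' : (ret.set (i - 1).toNat v).length = n.toNat := by simp [hlen]
      rw [ih n (i + 1) _ (by omega) (by omega) hlen']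
      rw [PySem.List.pyRange_one_cons (show i < n + 1 by omega)]
      rw [List.set_eq_take_append_cons_drop]
      simp only [hidx, if_true]
      have htn : (i + 1 - 1).toNat = (i - 1).toNat + 1 := by omega
      rw [htn]
      rw [List.take_append]
      simp only [List.length_take]
      have h1 : (i - 1).toNat + 1 - min (i - 1).toNat ret.length = 1 := by omega
      have h2 : min ((i - 1).toNat + 1) ((i - 1).toNat) = (i - 1).toNat := by omega
      rw [h1, List.take_take, h2]
      simp only [List.take_succ_cons, List.take_zero, List.map_cons, List.append_assoc,
        List.singleton_append]
      rfl
    · rw [pvWhileA]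
      simp only [hni, if_false]
      rw [PySem.List.pyRange_one_eq_nil (by omega)]
      rw [List.take_of_length_le (by omega)]
      simp

-- ===== VERDICT (by name: the statement is the Claim_ definition above) =====
theorem bitFlipsBitwise_spec : Claim_equal_bitFlipsBitwise := by
  intro n _
  show bitFlipsBitwise n = bitFlipsBitwise_alt n
  rw [bitFlipsBitwise, bitFlipsBitwise_alt]
  rw [pv_whileA_eq ((n + 1 - 1).toNat) n 1 _ le_rfl le_rfl (by simp)]
  rw [PySem.List.foldl_append_singleton_eq_map]
  simp only [List.nil_append, Int.sub_self, Int.toNat_zero, List.take_zero]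
  apply List.map_congr_left
  intro t ht
  have hmem := (PySem.List.mem_pyRange_one).mp ht
  have ht1 : 1 ≤ t := hmem.1
  obtain ⟨j, rfl⟩ : ∃ j : Nat, t = (j : Int) := ⟨t.toNat, by omega⟩
  have hj1 : 1 ≤ j := by exact_mod_cast ht1
  have hsub : (j : Int) - 1 = ((j - 1 : Nat) : Int) := by omega
  rw [hsub, PySem.Int.bxor_natCast, pv_count_pyBin]
  simp only [Int.toNat_natCast]
  exact pv_main j hj1
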